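-- pv_equiv track=rewrite | github.com/Monk3yDev/kvlang-vscode | server/kvls/kvlint.py | rule_whitespace
-- ===== SOURCE A (Python) =====
-- def rule_whitespace(line):
--     """Check if rule is build without whitespace."""
--     for character in line:
--         if character != '>':
--             if character.isspace():
--                 return True
--         else:
--             break
--     return False
-- ===== SOURCE B (Python) =====
-- def rule_whitespace(line):
--     """Check if rule is build without whitespace."""
--     ws = next((i for i, c in enumerate(line) if c.isspace()), -1)
--     gt = line.find('>')
--     return ws != -1 and (gt == -1 or ws < gt)
-- ===== Notes on version B (the rewrite author's own statement) =====
-- stated objective: alternative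
-- what changed: B runs two independent searches (index of the first whitespace character, index of the first '>') and decides by comparing the two positions, instead of A's single prefix scan that breaks at '>'; same O(n) cost.
import Mathlib
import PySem

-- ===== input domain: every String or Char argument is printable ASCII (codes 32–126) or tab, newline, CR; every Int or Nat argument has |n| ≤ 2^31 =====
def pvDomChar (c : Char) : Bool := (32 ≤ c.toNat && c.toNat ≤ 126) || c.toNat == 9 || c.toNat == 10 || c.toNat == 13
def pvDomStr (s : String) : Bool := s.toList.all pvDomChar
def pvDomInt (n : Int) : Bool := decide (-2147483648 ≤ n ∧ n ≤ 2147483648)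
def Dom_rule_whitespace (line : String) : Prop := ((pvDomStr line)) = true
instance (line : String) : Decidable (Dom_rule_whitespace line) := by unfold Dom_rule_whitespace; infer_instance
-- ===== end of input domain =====

-- B decides by comparing the positions of two independent searches (first whitespace, first '>') instead of A's prefix scan that breaks at '>'; alternative decomposition, same value.
-- ===== PORT A =====
-- 'for character in line: if character != '>': if character.isspace(): return True else: break; return False'
def rule_whitespace_loop : List Char → Bool
  | [] => false
  | c :: rest =>
    if c ≠ '>' then
      if PySem.Chars.isspace c then true else rule_whitespace_loop rest
    else false

def rule_whitespace (line : String) : Bool := rule_whitespace_loop line.toList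

-- ===== PORT B =====
-- 'ws = next((i for i, c in enumerate(line) if c.isspace()), -1); gt = line.find('>'); return ws != -1 and (gt == -1 or ws < gt)'
def rule_whitespace_alt (line : String) : Bool :=
  let ws : Int := match line.toList.findIdx? PySem.Chars.isspace with
    | some i => (i : Int)
    | none => -1
  let gt : Int := PySem.Str.find line ">"
  ws != -1 && (gt == -1 || ws < gt)

-- ===== PRECONDITION & SPEC =====
def Spec_rule_whitespace (line : String) (out : Bool) : Prop := out = rule_whitespace_alt line
instance (line : String) (out : Bool) : Decidable (Spec_rule_whitespace line out) := by unfold Spec_rule_whitespace; infer_instance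

-- ===== CLAIM (what is proved, stated in full; the proofs are below) =====
def Claim_equal_rule_whitespace : Prop := ∀ (line : String), Dom_rule_whitespace line → Spec_rule_whitespace line (rule_whitespace line)

-- ===== LEMMAS AND PROOFS =====

-- A's loop returns 'some whitespace char occurs strictly before the first ">"'.
theorem loop_eq_takeWhile (cs : List Char) :
    rule_whitespace_loop cs = (cs.takeWhile (fun x => !decide (x = '>'))).any PySem.Chars.isspace := by
  induction cs with
  | nil => simp [rule_whitespace_loop]
  | cons c rest ih =>
    by_cases h : c = '>'
    · simp [rule_whitespace_loop, h]
    · by_cases hs : PySem.Chars.isspace c <;>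
        simp [rule_whitespace_loop, h, hs, ih]

-- take up to the first occurrence of '>' is exactly takeWhile (≠ '>')
theorem take_eq_takeWhile (cs : List Char) (j : Nat)
    (hj : ['>'] <+: cs.drop j) (hmin : ∀ i < j, ¬ ['>'] <+: cs.drop i) :
    cs.take j = cs.takeWhile (fun x => !decide (x = '>')) := by
  induction cs generalizing j with
  | nil => simp at hj
  | cons c rest ih =>
    cases j with
    | zero =>
      obtain ⟨t, ht⟩ := hj
      simp at ht
      simp [ht.1.symm]
    | succ j' =>
      have hc : ¬ (c = '>') := by
        intro h
        exact hmin 0 (Nat.succ_pos _) ⟨rest, by simp [h]⟩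
      simp only [List.take_succ_cons, List.takeWhile_cons, hc, decide_false,
        Bool.not_false, if_pos]
      simp only [List.cons.injEq, true_and]
      exact ih j' (by simpa using hj) (fun i hi => by
        have := hmin (i + 1) (by omega)
        simpa using this)

-- any over a prefix, phrased through the first matching index
theorem any_take (cs : List Char) (p : Char → Bool) (n : Nat) :
    (cs.take n).any p = (match cs.findIdx? p with
      | some i => decide (i < n)
      | none => false) := by
  induction cs generalizing n with
  | nil => simp [List.findIdx?_nil]
  | cons c rest ih =>
    cases n with
    | zero =>
      cases hf : (c :: rest).findIdx? p <;> simp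
    | succ n' =>
      by_cases hc : p c
      · simp [List.findIdx?_cons, hc]
      · simp only [List.take_succ_cons, List.any_cons, hc, Bool.false_or,
          List.findIdx?_cons, ih n']
        cases hf : rest.findIdx? p <;> simp

theorem rule_whitespace_spec_aux (line : String) :
    rule_whitespace line = rule_whitespace_alt line := by
  unfold rule_whitespace rule_whitespace_alt
  have hg : (">" : String).toList = ['>'] := rfl
  simp only [PySem.Str.find_eq, hg]
  rw [loop_eq_takeWhile]
  set cs := line.toList with hcs
  by_cases h : PySem.Chars.find cs ['>'] = -1
  · have hmem : ¬ ['>'] <:+: cs :=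
      (PySem.Chars.find_eq_neg_one_iff (s := cs) (sub := ['>'])).mp h
    have hchar : ∀ x ∈ cs, (fun x => !decide (x = '>')) x = true := by
      intro x hx
      simp only [Bool.not_eq_eq_eq_not, Bool.not_true, decide_eq_false_iff_not]
      intro hxe
      obtain ⟨s, t, hst⟩ := List.append_of_mem (hxe ▸ hx)
      exact hmem ⟨s, t, by simp [hst]⟩
    rw [List.takeWhile_eq_self_iff.mpr hchar]
    have := any_take cs PySem.Chars.isspace cs.length
    rw [List.take_length] at this
    rw [this]
    cases hf : cs.findIdx? PySem.Chars.isspace with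
    | none => simp [h]
    | some i =>
      have hi : i < cs.length := (List.findIdx?_eq_some_iff_findIdx_eq.mp hf).1
      simp [h, hi]
  · have hnn : 0 ≤ PySem.Chars.find cs ['>'] := by
      have := PySem.Chars.neg_one_le_find (s := cs) (sub := ['>'])
      omega
    obtain ⟨hpre, hfirst⟩ := PySem.Chars.find_spec (s := cs) (sub := ['>']) hnn
    rw [← take_eq_takeWhile _ _ hpre hfirst,
        any_take cs PySem.Chars.isspace (PySem.Chars.find cs ['>']).toNat]
    cases hf : cs.findIdx? PySem.Chars.isspace with
    | none => simp
    | some i =>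
      by_cases hlt : i < (PySem.Chars.find cs ['>']).toNat
      · have : (i : Int) < PySem.Chars.find cs ['>'] := by omega
        simp [hlt, this]
      · have : ¬ ((i : Int) < PySem.Chars.find cs ['>']) := by omega
        simp [h, hlt, this]

-- ===== VERDICT (by name: the statement is the Claim_ definition above) =====
theorem rule_whitespace_spec : Claim_equal_rule_whitespace := by
  intro line _
  exact rule_whitespace_spec_aux line
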